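-- pv_equiv track=rewrite | github.com/Jkker/basic-algo | Chapter 2/HW2-3 Trees, Eval, Linkedlist/diagonal_array_filling.py | diagonal_filling_a
-- ===== SOURCE A (Python) =====
-- def diagonal_filling_a(n):
--     # Constructing n×n array
--     arr = [[0 for i in range(n)] for j in range(n)]
--     counter = 1
--     for i in range(n):
--         arr[i][i] = 0  # the main diagonal
--         for j in range(i):
--             arr[j][i] = counter  # upper triangle
--             counter += 1
--     return arr
-- ===== SOURCE B (Python) =====
-- def diagonal_filling_a(n):
--     # Closed form: cell (r, c) of the upper triangle is filled in column-major
--     # order, so its value is the number of cells strictly before it plus one: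
--     # c*(c-1)//2 + r + 1. No running counter, no fill order.
--     return [[c * (c - 1) // 2 + r + 1 if r < c else 0 for c in range(n)]
--             for r in range(n)]
-- ===== Notes on version B (the rewrite author's own statement) =====
-- stated objective: simpler
-- what changed: Replaced the order-dependent mutable fill with a running counter by a per-cell closed form c*(c-1)//2 + r + 1 computed independently for each coordinate in a nested comprehension.
import Mathlib
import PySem

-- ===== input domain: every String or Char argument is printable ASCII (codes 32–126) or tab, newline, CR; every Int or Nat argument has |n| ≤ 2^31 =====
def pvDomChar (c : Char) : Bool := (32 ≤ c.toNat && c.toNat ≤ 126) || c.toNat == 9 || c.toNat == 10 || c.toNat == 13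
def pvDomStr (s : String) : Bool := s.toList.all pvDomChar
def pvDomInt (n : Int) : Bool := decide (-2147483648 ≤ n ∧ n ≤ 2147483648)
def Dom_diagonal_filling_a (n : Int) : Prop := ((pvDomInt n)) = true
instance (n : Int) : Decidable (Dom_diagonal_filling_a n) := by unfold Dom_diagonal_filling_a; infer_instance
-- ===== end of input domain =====

-- B replaces A's order-dependent mutable fill with a running counter by an
-- independent per-cell closed form (objective: simpler).

-- ===== PORT A =====
-- Python lists are mutable arrays, so A's n×n array is an Array of Arrays.
-- pvSet2 is arr[j][i] = v ; exact here because every index used by A is a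
-- loop variable with 0 ≤ j < n and 0 ≤ i < n, in range of the n×n array.
def pvSet2 (arr : Array (Array Int)) (j i : Int) (v : Int) : Array (Array Int) :=
  arr.modify j.toNat (fun row => row.set! i.toNat v)

def diagonal_filling_a (n : Int) : List (List Int) :=
  let arr0 : Array (Array Int) := ((PySem.List.pyRange 0 n 1).map
    (fun _j => ((PySem.List.pyRange 0 n 1).map (fun _i => (0 : Int))).toArray)).toArray
  let st := (PySem.List.pyRange 0 n 1).foldl
    (fun (st : Array (Array Int) × Int) i =>
      let arr1 := pvSet2 st.1 i i 0          -- arr[i][i] = 0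
      (PySem.List.pyRange 0 i 1).foldl
        (fun (st2 : Array (Array Int) × Int) j =>
          (pvSet2 st2.1 j i st2.2, st2.2 + 1))  -- arr[j][i] = counter; counter += 1
        (arr1, st.2))
    (arr0, 1)
  (st.1.map (fun r => r.toList)).toList

-- ===== PORT B =====
def diagonal_filling_a_alt (n : Int) : List (List Int) :=
  (PySem.List.pyRange 0 n 1).map (fun r =>
    (PySem.List.pyRange 0 n 1).map (fun c =>
      if r < c then PySem.Int.floordiv (c * (c - 1)) 2 + r + 1 else 0))

-- ===== PRECONDITION & SPEC =====
def Spec_diagonal_filling_a (n : Int) (out : List (List Int)) : Prop := out = diagonal_filling_a_alt n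
instance (n : Int) (out : List (List Int)) : Decidable (Spec_diagonal_filling_a n out) := by unfold Spec_diagonal_filling_a; infer_instance

-- ===== CLAIM (what is proved, stated in full; the proofs are below) =====
def Claim_equal_diagonal_filling_a : Prop := ∀ (n : Int), Dom_diagonal_filling_a n → Spec_diagonal_filling_a n (diagonal_filling_a n)

-- ===== LEMMAS AND PROOFS =====

-- list-level mirror of pvSet2, and the bridge from the Array state to lists
def pvSetL (arr : List (List Int)) (j i : Int) (v : Int) : List (List Int) :=
  arr.modify j.toNat (fun row => row.set i.toNat v)

def pvToL (a : Array (Array Int)) : List (List Int) := (a.map (fun r => r.toList)).toList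

def pvF (st : Array (Array Int) × Int) : List (List Int) × Int := (pvToL st.1, st.2)

lemma pv_toL_set2 (a : Array (Array Int)) (j i v : Int) :
    pvToL (pvSet2 a j i v) = pvSetL (pvToL a) j i v := by
  unfold pvToL pvSet2 pvSetL
  simp only [Array.toList_map, Array.toList_modify]
  apply List.ext_getElem
  · simp
  · intro k h1 h2
    simp only [List.getElem_map, List.getElem_modify]
    by_cases h : j.toNat = k <;> simp [h]

lemma pv_fold_comm (l : List Int) (st0 : Array (Array Int) × Int) :
    List.foldl (fun (st : List (List Int) × Int) i =>
        (PySem.List.pyRange 0 i 1).foldl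
          (fun st2 j => (pvSetL st2.1 j i st2.2, st2.2 + 1))
          (pvSetL st.1 i i 0, st.2))
      (pvF st0) l
    = pvF (List.foldl (fun (st : Array (Array Int) × Int) i =>
        (PySem.List.pyRange 0 i 1).foldl
          (fun st2 j => (pvSet2 st2.1 j i st2.2, st2.2 + 1))
          (pvSet2 st.1 i i 0, st.2))
      st0 l) := by
  apply List.foldl_hom
  intro st i
  have hinner := List.foldl_hom (f := pvF)
    (g₁ := fun (st2 : Array (Array Int) × Int) j => (pvSet2 st2.1 j i st2.2, st2.2 + 1))
    (g₂ := fun (st2 : List (List Int) × Int) j => (pvSetL st2.1 j i st2.2, st2.2 + 1))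
    (l := PySem.List.pyRange 0 i 1)
    (init := (pvSet2 st.1 i i 0, st.2))
    (by intro x y; simp [pvF, pv_toL_set2])
  have hstart : pvF (pvSet2 st.1 i i 0, st.2) = (pvSetL (pvF st).1 i i 0, (pvF st).2) := by
    simp [pvF, pv_toL_set2]
  rw [← hstart]
  exact hinner

-- closed form for the counter value when cell (row r, column c) is written
def pvCf (r c : Int) : Int := PySem.Int.floordiv (c * (c - 1)) 2 + r + 1

-- state of A's array: columns < i fully filled, column i filled for rows < t
def pvSmat (m i t : Nat) : List (List Int) :=
  (List.range m).map (fun r => (List.range m).map (fun c =>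
    if r < c ∧ (c < i ∨ (c = i ∧ r < t)) then pvCf r c else 0))

lemma pv_set_map_range {α : Type} (m t : Nat) (f : Nat → α) (v : α) :
    ((List.range m).map f).set t v
      = (List.range m).map (fun r => if r = t then v else f r) := by
  apply List.ext_getElem
  · simp
  · intro k h1 h2
    simp only [List.getElem_set, List.getElem_map, List.getElem_range]
    by_cases h : t = k
    · subst h; simp
    · simp [h, Ne.symm h]

lemma pv_modify_map_range {α : Type} (m t : Nat) (f : Nat → α) (g : α → α) :
    ((List.range m).map f).modify t g
      = (List.range m).map (fun r => if r = t then g (f r) else f r) := by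
  apply List.ext_getElem
  · simp
  · intro k h1 h2
    simp only [List.getElem_modify, List.getElem_map, List.getElem_range]
    by_cases h : t = k
    · subst h; simp
    · simp [h, Ne.symm h]

lemma pv_half_double (t : Int) : PySem.Int.floordiv (2 * t) 2 = t := by
  rw [PySem.Int.floordiv_eq_ediv_of_pos (by norm_num)]; omega

lemma pv_cf_diag (k : Int) : pvCf k k = pvCf 0 (k + 1) := by
  obtain ⟨t, ht⟩ := Int.even_mul_succ_self (k - 1)
  have h1 : k * (k - 1) = 2 * t := by ring_nf; ring_nf at ht; omega
  have h2 : (k + 1) * (k + 1 - 1) = 2 * (t + k) := by nlinarith [ht]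
  unfold pvCf
  rw [h1, h2, pv_half_double, pv_half_double]
  ring

lemma pv_inner_step (m i t : Nat) (ht : t < i) :
    pvSetL (pvSmat m i t) (t : Int) (i : Int) (pvCf t i) = pvSmat m i (t + 1) := by
  unfold pvSetL pvSmat
  simp only [Int.toNat_natCast]
  rw [pv_modify_map_range]
  apply List.map_congr_left
  intro r _
  by_cases hrt : r = t
  · subst hrt
    rw [if_pos rfl, pv_set_map_range]
    apply List.map_congr_left
    intro c _
    by_cases hci : c = i
    · subst hci
      rw [if_pos rfl, if_pos (by omega)]
    · rw [if_neg hci]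
      exact if_congr (by omega) rfl rfl
  · rw [if_neg hrt]
    apply List.map_congr_left
    intro c _
    exact if_congr (by omega) rfl rfl

lemma pv_diag_noop (m i : Nat) :
    pvSetL (pvSmat m i 0) (i : Int) (i : Int) 0 = pvSmat m i 0 := by
  unfold pvSetL pvSmat
  simp only [Int.toNat_natCast]
  rw [pv_modify_map_range]
  apply List.map_congr_left
  intro r _
  by_cases hri : r = i
  · rw [if_pos hri, pv_set_map_range]
    apply List.map_congr_left
    intro c _
    by_cases hci : c = i
    · rw [if_pos hci, if_neg (by omega)]
    · rw [if_neg hci]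
  · rw [if_neg hri]

lemma pv_smat_roll (m i : Nat) : pvSmat m i i = pvSmat m (i + 1) 0 := by
  unfold pvSmat
  apply List.map_congr_left
  intro r _
  apply List.map_congr_left
  intro c _
  exact if_congr (by omega) rfl rfl

lemma pv_inner_loop (m i : Nat) : ∀ t ≤ i,
    (List.range t).foldl
      (fun (st2 : List (List Int) × Int) (j : Nat) =>
        (pvSetL st2.1 (j : Int) (i : Int) st2.2, st2.2 + 1))
      (pvSmat m i 0, pvCf 0 i)
    = (pvSmat m i t, pvCf t i) := by
  intro t
  induction t with
  | zero => intro _; simp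
  | succ t ih =>
    intro h
    rw [List.range_succ, List.foldl_append, ih (by omega)]
    simp only [List.foldl_cons, List.foldl_nil]
    rw [pv_inner_step m i t (by omega)]
    have hc : pvCf (t : Int) (i : Int) + 1 = pvCf ((t + 1 : Nat) : Int) (i : Int) := by
      unfold pvCf; push_cast; ring
    rw [hc]

lemma pv_outer_loop (m : Nat) : ∀ k ≤ m,
    (List.range k).foldl
      (fun (st : List (List Int) × Int) (i : Nat) =>
        (PySem.List.pyRange 0 (i : Int) 1).foldl
          (fun (st2 : List (List Int) × Int) j =>
            (pvSetL st2.1 j (i : Int) st2.2, st2.2 + 1))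
          (pvSetL st.1 (i : Int) (i : Int) 0, st.2))
      (pvSmat m 0 0, 1)
    = (pvSmat m k 0, pvCf 0 k) := by
  intro k
  induction k with
  | zero =>
    intro _
    simp only [List.range_zero, List.foldl_nil]
    have h0 : (1 : Int) = pvCf 0 ((0 : Nat) : Int) := by
      unfold pvCf
      have he : ((0 : Nat) : Int) * (((0 : Nat) : Int) - 1) = 2 * 0 := by norm_num
      rw [he, pv_half_double]
      norm_num
    rw [← h0]
  | succ k ih =>
    intro h
    rw [List.range_succ, List.foldl_append, ih (by omega)]
    simp only [List.foldl_cons, List.foldl_nil]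
    rw [pv_diag_noop m k, PySem.List.pyRange_zero_natCast, List.foldl_map,
      pv_inner_loop m k k le_rfl, pv_smat_roll m k, pv_cf_diag]
    have : ((k : Int) + 1) = ((k + 1 : Nat) : Int) := by push_cast; ring
    rw [this]

-- ===== VERDICT (by name: the statement is the Claim_ definition above) =====
lemma pv_A_eq (m : Nat) : diagonal_filling_a (m : Int) = pvSmat m m 0 := by
  show (pvF (List.foldl
      (fun (st : Array (Array Int) × Int) i =>
        (PySem.List.pyRange 0 i 1).foldl
          (fun st2 j => (pvSet2 st2.1 j i st2.2, st2.2 + 1))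
          (pvSet2 st.1 i i 0, st.2))
      (((PySem.List.pyRange 0 (m : Int) 1).map
          (fun _j => ((PySem.List.pyRange 0 (m : Int) 1).map (fun _i => (0 : Int))).toArray)).toArray, 1)
      (PySem.List.pyRange 0 (m : Int) 1))).1 = pvSmat m m 0
  rw [← pv_fold_comm]
  have hF0 : pvF ((((PySem.List.pyRange 0 (m : Int) 1).map
          (fun _j => ((PySem.List.pyRange 0 (m : Int) 1).map (fun _i => (0 : Int))).toArray)).toArray
        : Array (Array Int)), 1) = (pvSmat m 0 0, 1) := by
    simp only [pvF, pvToL, List.map_toArray, List.toList_toArray,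
      PySem.List.pyRange_zero_natCast, List.map_map, Function.comp_def, Prod.mk.injEq]
    refine ⟨?_, trivial⟩
    unfold pvSmat
    apply List.map_congr_left
    intro r _
    apply List.map_congr_left
    intro c _
    rw [if_neg (by omega)]
  rw [hF0, PySem.List.pyRange_zero_natCast, List.foldl_map, pv_outer_loop m m le_rfl]

lemma pv_B_eq (m : Nat) : diagonal_filling_a_alt (m : Int) = pvSmat m m 0 := by
  simp only [diagonal_filling_a_alt]
  rw [PySem.List.pyRange_zero_natCast]
  unfold pvSmat
  simp only [List.map_map, Function.comp_def]
  apply List.map_congr_left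
  intro r _
  apply List.map_congr_left
  intro c hc
  have hcm : c < m := List.mem_range.mp hc
  unfold pvCf
  exact if_congr (by omega) rfl rfl

theorem diagonal_filling_a_spec : Claim_equal_diagonal_filling_a := by
  intro n _
  unfold Spec_diagonal_filling_a
  by_cases hn : n ≤ 0
  · simp [diagonal_filling_a, diagonal_filling_a_alt,
      PySem.List.pyRange_one_eq_nil hn]
  · have h0 : n = ((n.toNat : Nat) : Int) := by omega
    rw [h0, pv_A_eq, pv_B_eq]
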